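-- pv_equiv track=rewrite | github.com/jingry/autoBioSeqpy | tool/libs/sequenceshuffles.py | int_tokenize
-- ===== SOURCE A (Python) =====
-- def int_tokenize(itr, lexicographic_order=False):
--     """
--     int tokenize iterable
--     return dict mapping symbol to int token
--
--     Args:
--         * itr - iterable
--         * lexicographic_order - (bool) iff True sort integer labels lexicographically according to itr
--
--     Returns:
--         * tokenized - (int list) tokenized
--
--     """
--     tokenized = []
--
--     symbol_to_token = {} # symbol to int token dict
--     for x in itr:
--         int_token = symbol_to_token.get(x, len(symbol_to_token))
--         symbol_to_token[x] = int_token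
--         tokenized.append(int_token)
--
--     if lexicographic_order:
--         K = len(symbol_to_token) # number of distinct symbols
--         token_to_symbol = {v:k for (k,v) in symbol_to_token.items()}
--         symbol_to_token = dict(zip(sorted(symbol_to_token.keys()), range(K))) # sorted
--         token_to_token = {k:symbol_to_token[token_to_symbol[k]] for k in range(K)} # token to sorted token
--         n = len(tokenized)
--         for i in range(n):
--             tokenized[i] = token_to_token[tokenized[i]]
--
--     return (tokenized, symbol_to_token)
-- ===== SOURCE B (Python) =====
-- def int_tokenize(itr, lexicographic_order=False):
--     """Same result as A: sorted-rank tokens when lexicographic_order, else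
--     first-encounter tokens; built directly, without A's dict inversion and
--     token relabelling passes."""
--     items = list(itr)
--     if lexicographic_order:
--         symbol_to_token = {s: i for i, s in enumerate(sorted(set(items)))}
--         tokenized = [symbol_to_token[x] for x in items]
--     else:
--         symbol_to_token = {}
--         tokenized = []
--         for x in items:
--             if x not in symbol_to_token:
--                 symbol_to_token[x] = len(symbol_to_token)
--             tokenized.append(symbol_to_token[x])
--     return (tokenized, symbol_to_token)
-- ===== Notes on version B (the rewrite author's own statement) =====
-- stated objective: simpler
-- what changed: In the lexicographic case B builds the symbol-to-token dict directly from the sorted distinct symbols and tokenizes in one comprehension, replacing A's first-encounter pass plus dict inversion plus token-to-token relabel loop; the non-lexicographic case keeps a plain first-encounter loop.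
import Mathlib
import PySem

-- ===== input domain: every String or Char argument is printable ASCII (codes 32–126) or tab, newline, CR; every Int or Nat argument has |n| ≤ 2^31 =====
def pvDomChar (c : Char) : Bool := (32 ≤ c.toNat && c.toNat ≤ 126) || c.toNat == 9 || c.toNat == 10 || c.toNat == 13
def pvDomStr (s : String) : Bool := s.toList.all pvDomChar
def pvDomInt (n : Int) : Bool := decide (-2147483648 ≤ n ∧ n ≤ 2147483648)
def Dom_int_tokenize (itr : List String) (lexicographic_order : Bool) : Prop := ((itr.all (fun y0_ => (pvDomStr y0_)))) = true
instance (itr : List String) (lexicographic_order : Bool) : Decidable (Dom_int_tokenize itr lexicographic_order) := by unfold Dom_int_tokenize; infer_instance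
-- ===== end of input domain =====

-- B builds the lexicographic tokenization directly from the sorted distinct symbols,
-- replacing A's dict inversion and token-to-token relabel passes (objective: simpler).

-- ===== PORT A =====
def int_tokenize (itr : List String) (lexicographic_order : Bool) : List Int × (List (String × Int)) :=
  let st := itr.foldl (fun (st : List Int × PySem.Dict String Int) x =>
      let int_token := st.2.getD x (st.2.size : Int)
      (st.1 ++ [int_token], st.2.insert x int_token)) ([], PySem.Dict.empty)
  let tokenized := st.1
  let symbol_to_token := st.2
  if lexicographic_order then
    let K := symbol_to_token.size
    let token_to_symbol : PySem.Dict Int String :=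
      PySem.Dict.ofList (symbol_to_token.items.map (fun p => (p.2, p.1)))
    let symbol_to_token2 : PySem.Dict String Int :=
      PySem.Dict.ofList ((PySem.List.sorted symbol_to_token.keys (fun s => s) false).zip
        (PySem.List.pyRange 0 (K : Int) 1))
    -- Python indexes the two dicts with [] below; every key looked up is present,
    -- so the getD defaults "" / 0 are never used (exact)
    let token_to_token : PySem.Dict Int Int :=
      PySem.Dict.ofList ((PySem.List.pyRange 0 (K : Int) 1).map
        (fun k => (k, symbol_to_token2.getD (token_to_symbol.getD k "") 0)))
    let n := tokenized.length
    let tokenized := (PySem.List.pyRange 0 (n : Int) 1).foldl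
      (fun tk i => PySem.List.pySetD tk i (token_to_token.getD (PySem.List.pyGetD tk i 0) 0)) tokenized
    (tokenized, symbol_to_token2.items)
  else
    (tokenized, symbol_to_token.items)

-- ===== PORT B =====
def int_tokenize_alt (itr : List String) (lexicographic_order : Bool) : List Int × (List (String × Int)) :=
  let items := itr
  if lexicographic_order then
    let symbol_to_token : PySem.Dict String Int :=
      (PySem.List.enumerate (PySem.List.sorted (PySem.Set.ofList items) (fun s => s) false) 0).foldl
        (fun d p => d.insert p.2 p.1) PySem.Dict.empty
    -- Python looks the tokens up with [] ; every x is in the dict, so the default 0 is never used (exact)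
    let tokenized := items.map (fun x => symbol_to_token.getD x 0)
    (tokenized, symbol_to_token.items)
  else
    let st := items.foldl (fun (st : List Int × PySem.Dict String Int) x =>
        let d := if st.2.contains x then st.2 else st.2.insert x (st.2.size : Int)
        (st.1 ++ [d.getD x 0], d)) ([], PySem.Dict.empty)
    (st.1, st.2.items)

-- ===== PRECONDITION & SPEC =====
def Spec_int_tokenize (itr : List String) (lexicographic_order : Bool) (out : List Int × (List (String × Int))) : Prop := out = int_tokenize_alt itr lexicographic_order
instance (itr : List String) (lexicographic_order : Bool) (out : List Int × (List (String × Int))) : Decidable (Spec_int_tokenize itr lexicographic_order out) := by unfold Spec_int_tokenize; infer_instance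

-- ===== CLAIM (what is proved, stated in full; the proofs are below) =====
def Claim_equal_int_tokenize : Prop := ∀ (itr : List String) (lexicographic_order : Bool), Dom_int_tokenize itr lexicographic_order → Spec_int_tokenize itr lexicographic_order (int_tokenize itr lexicographic_order)

-- ===== LEMMAS AND PROOFS =====
-- helper notions (proof-side only)
def pvS (itr : List String) : List String := PySem.Set.ofList itr
def pvIdx (itr : List String) (s : String) : Int := ((pvS itr).idxOf s : Int)
def pvSpecDict (itr : List String) : PySem.Dict String Int :=
  PySem.Dict.mk ((pvS itr).map (fun s => (s, pvIdx itr s)))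

theorem pv_keys_spec (itr : List String) : (pvSpecDict itr).keys = pvS itr := by
  simp [pvSpecDict, PySem.Dict.keys, Function.comp_def]

theorem pv_nodup_S (itr : List String) : (pvS itr).Nodup := PySem.Set.nodup_ofList itr

theorem pv_insert_self {κ ν : Type} [BEq κ] [LawfulBEq κ] (d : PySem.Dict κ ν) (k : κ) (v : ν)
    (hnd : d.keys.Nodup) (h : (k, v) ∈ d.items) : d.insert k v = d := by
  have hc : d.contains k := by
    rw [PySem.Dict.contains_iff_mem_keys]
    exact PySem.Dict.mem_keys_of_mem_items _ h
  have hget : d.get? k = some v := PySem.Dict.get?_of_mem_items _ h hnd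
  apply PySem.Dict.ext
  rw [PySem.Dict.items_insert_of_contains]
  · conv_rhs => rw [← List.map_id d.items]
    apply List.map_congr_left
    intro p hp
    have hget2 : d.get? p.1 = some p.2 := PySem.Dict.get?_of_mem_items _ hp hnd
    by_cases hk : p.1 = k
    · rw [hk] at hget2
      rw [hget2] at hget
      have hpv : p = (k, v) := Prod.ext hk (Option.some_inj.mp hget)
      simp [hpv]
    · simp [hk]
  · exact hc

theorem pv_mem_items_spec (itr : List String) (x : String) (hx : x ∈ pvS itr) :
    (x, pvIdx itr x) ∈ (pvSpecDict itr).items := by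
  simp only [pvSpecDict]
  exact List.mem_map_of_mem hx

theorem pv_getD_spec (itr : List String) (x : String) (hx : x ∈ pvS itr) (d0 : Int) :
    (pvSpecDict itr).getD x d0 = pvIdx itr x := by
  exact PySem.Dict.getD_of_mem_items _ (pv_mem_items_spec itr x hx)
    (by rw [pv_keys_spec]; exact pv_nodup_S itr) d0

theorem pv_size_spec (itr : List String) : (pvSpecDict itr).size = (pvS itr).length := by
  simp [pvSpecDict, PySem.Dict.size]

theorem pv_contains_spec (itr : List String) (x : String) :
    (pvSpecDict itr).contains x = decide (x ∈ pvS itr) := by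
  rw [PySem.Dict.contains_eq_decide_mem_keys, pv_keys_spec]

theorem pv_mem_S (itr : List String) (a : String) (h : a ∈ itr) : a ∈ pvS itr :=
  (PySem.Set.mem_ofList itr a).mpr h

theorem pvS_append_of_mem (l : List String) (x : String) (hx : x ∈ pvS l) :
    pvS (l ++ [x]) = pvS l := by
  unfold pvS at *
  rw [PySem.Set.ofList_append_singleton, PySem.Set.add_of_mem hx]

theorem pvS_append_of_not_mem (l : List String) (x : String) (hx : x ∉ pvS l) :
    pvS (l ++ [x]) = pvS l ++ [x] := by
  unfold pvS at *
  rw [PySem.Set.ofList_append_singleton, PySem.Set.add_of_not_mem hx]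

theorem pvIdx_append_of_mem (l : List String) (x a : String) (ha : a ∈ pvS l) :
    pvIdx (l ++ [x]) a = pvIdx l a := by
  by_cases hx : x ∈ pvS l
  · unfold pvIdx; rw [pvS_append_of_mem l x hx]
  · unfold pvIdx
    rw [pvS_append_of_not_mem l x hx, List.idxOf_append, if_pos ha]

theorem pvIdx_append_self_of_not_mem (l : List String) (x : String) (hx : x ∉ pvS l) :
    pvIdx (l ++ [x]) x = ((pvS l).length : Int) := by
  unfold pvIdx
  rw [pvS_append_of_not_mem l x hx, List.idxOf_append, if_neg hx]
  simp

theorem pvSpecDict_append_of_mem (l : List String) (x : String) (hx : x ∈ pvS l) :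
    pvSpecDict (l ++ [x]) = pvSpecDict l := by
  unfold pvSpecDict
  rw [pvS_append_of_mem l x hx]
  congr 1
  exact List.map_congr_left (fun a ha => by rw [pvIdx_append_of_mem l x a ha])

theorem pvSpecDict_append_of_not_mem (l : List String) (x : String) (hx : x ∉ pvS l) :
    pvSpecDict (l ++ [x]) =
      PySem.Dict.mk ((pvSpecDict l).items ++ [(x, ((pvS l).length : Int))]) := by
  unfold pvSpecDict
  rw [pvS_append_of_not_mem l x hx, List.map_append]
  dsimp only
  rw [show List.map (fun s => (s, pvIdx (l ++ [x]) s)) (pvS l)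
      = List.map (fun s => (s, pvIdx l s)) (pvS l) from
    List.map_congr_left (fun a ha => by rw [pvIdx_append_of_mem l x a ha])]
  simp [pvIdx_append_self_of_not_mem l x hx]

theorem pv_map_idx_append (l : List String) (x : String) :
    l.map (fun a => pvIdx (l ++ [x]) a) = l.map (fun a => pvIdx l a) :=
  List.map_congr_left (fun a ha => pvIdx_append_of_mem l x a (pv_mem_S l a ha))

theorem pv_foldA (itr : List String) :
    itr.foldl (fun (st : List Int × PySem.Dict String Int) x =>
      let int_token := st.2.getD x (st.2.size : Int)
      (st.1 ++ [int_token], st.2.insert x int_token)) ([], PySem.Dict.empty)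
    = (itr.map (fun x => pvIdx itr x), pvSpecDict itr) := by
  induction itr using List.reverseRecOn with
  | nil => rfl
  | append_singleton l x ih =>
    rw [List.foldl_append, ih]
    simp only [List.foldl_cons, List.foldl_nil, List.map_append, pv_map_idx_append]
    by_cases hx : x ∈ pvS l
    · rw [pv_getD_spec l x hx, pvSpecDict_append_of_mem l x hx,
        pv_insert_self _ _ _ (by rw [pv_keys_spec]; exact pv_nodup_S l) (pv_mem_items_spec l x hx)]
      simp [pvIdx_append_of_mem l x x hx]
    · have hc : (pvSpecDict l).contains x = false := by
        rw [pv_contains_spec]; simpa using hx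
      rw [PySem.Dict.getD_of_not_contains _ _ hc, pv_size_spec,
        pvSpecDict_append_of_not_mem l x hx]
      refine Prod.ext ?_ ?_
      · simp [pvIdx_append_self_of_not_mem l x hx]
      · apply PySem.Dict.ext
        rw [PySem.Dict.items_insert_of_not_contains _ _ hc]

theorem pv_foldB (itr : List String) :
    itr.foldl (fun (st : List Int × PySem.Dict String Int) x =>
      let d := if st.2.contains x then st.2 else st.2.insert x (st.2.size : Int)
      (st.1 ++ [d.getD x 0], d)) ([], PySem.Dict.empty)
    = (itr.map (fun x => pvIdx itr x), pvSpecDict itr) := by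
  induction itr using List.reverseRecOn with
  | nil => rfl
  | append_singleton l x ih =>
    rw [List.foldl_append, ih]
    simp only [List.foldl_cons, List.foldl_nil, List.map_append, pv_map_idx_append]
    by_cases hx : x ∈ pvS l
    · have hc : (pvSpecDict l).contains x = true := by
        rw [pv_contains_spec]; simpa using hx
      rw [hc]
      simp only [if_true]
      rw [pv_getD_spec l x hx, pvSpecDict_append_of_mem l x hx]
      simp [pvIdx_append_of_mem l x x hx]
    · have hc : (pvSpecDict l).contains x = false := by
        rw [pv_contains_spec]; simpa using hx
      rw [hc]
      simp only [Bool.false_eq_true, if_false]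
      rw [PySem.Dict.getD_insert_self, pv_size_spec, pvSpecDict_append_of_not_mem l x hx]
      refine Prod.ext ?_ ?_
      · simp [pvIdx_append_self_of_not_mem l x hx]
      · apply PySem.Dict.ext
        rw [PySem.Dict.items_insert_of_not_contains _ _ hc]

theorem pv_keys_ofList {κ ν : Type} [BEq κ] [LawfulBEq κ] (ps : List (κ × ν)) :
    (PySem.Dict.ofList ps).keys = PySem.Set.ofList (ps.map Prod.fst) := by
  show (ps.foldl (fun d p => d.insert p.1 p.2) PySem.Dict.empty).keys = _
  rw [PySem.Dict.keys_foldl_insert_key (key := Prod.fst) (f := fun d x => x.2)]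
  rfl

theorem pv_items_ofList {κ ν : Type} [BEq κ] [LawfulBEq κ] (ps : List (κ × ν))
    (h : (ps.map Prod.fst).Nodup) : (PySem.Dict.ofList ps).items = ps := by
  induction ps using List.reverseRecOn with
  | nil => rfl
  | append_singleton l p ih =>
    rw [List.map_append] at h
    have hdisj := (List.nodup_append.mp h).2.2
    have hp : p.1 ∉ l.map Prod.fst := fun hm => hdisj p.1 hm p.1 (by simp) rfl
    have hc : (PySem.Dict.ofList l).contains p.1 = false := by
      rw [Bool.eq_false_iff]
      intro ht
      have hmem : p.1 ∈ (PySem.Dict.ofList l).keys := (PySem.Dict.contains_iff_mem_keys _ _).mp ht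
      rw [pv_keys_ofList] at hmem
      exact hp ((PySem.Set.mem_ofList _ _).mp hmem)
    show ((l ++ [p]).foldl (fun d q => d.insert q.1 q.2) PySem.Dict.empty).items = _
    rw [List.foldl_append]
    simp only [List.foldl_cons, List.foldl_nil]
    rw [show (l.foldl (fun d q => d.insert q.1 q.2) PySem.Dict.empty) = PySem.Dict.ofList l from rfl,
      PySem.Dict.items_insert_of_not_contains _ _ hc,
      ih (List.nodup_append.mp h).1]

-- the sorted distinct symbols and the rank of a symbol
def pvSS (itr : List String) : List String := PySem.List.sorted (pvS itr) (fun s => s) false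
def pvRank (itr : List String) (x : String) : Int := ((pvSS itr).idxOf x : Int)

theorem pv_nodup_SS (itr : List String) : (pvSS itr).Nodup :=
  (PySem.List.sorted_perm (pvS itr) (fun s => s) false).nodup_iff.mpr (pv_nodup_S itr)

theorem pv_length_SS (itr : List String) : (pvSS itr).length = (pvS itr).length :=
  (PySem.List.sorted_perm (pvS itr) (fun s => s) false).length_eq

theorem pv_mem_SS (itr : List String) (x : String) : x ∈ pvSS itr ↔ x ∈ pvS itr :=
  (PySem.List.sorted_perm (pvS itr) (fun s => s) false).mem_iff

-- the pairs list (s, rank s) over the sorted symbols, as a zip with range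
theorem pv_zip_range (itr : List String) :
    (pvSS itr).zip (PySem.List.pyRange 0 ((pvS itr).length : Int) 1)
      = (pvSS itr).map (fun s => (s, pvRank itr s)) := by
  apply List.ext_getElem
  · simp [PySem.List.length_pyRange_one, pv_length_SS]
  · intro j h1 h2
    have hlen : (PySem.List.pyRange 0 ((pvS itr).length : Int) 1).length = (pvS itr).length := by
      simp [PySem.List.length_pyRange_one]
    have hj : j < (pvSS itr).length := by simp at h2; omega
    rw [List.getElem_zip, List.getElem_map, PySem.List.getElem_pyRange_one]
    have : pvRank itr ((pvSS itr)[j]) = (j : Int) := by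
      unfold pvRank
      rw [List.Nodup.idxOf_getElem (pv_nodup_SS itr)]
    rw [this]
    simp

theorem pv_getD_ofList_zip (itr : List String) (x : String) (hx : x ∈ pvS itr) (d0 : Int) :
    (PySem.Dict.ofList ((pvSS itr).zip (PySem.List.pyRange 0 ((pvS itr).length : Int) 1))).getD x d0
      = pvRank itr x := by
  rw [pv_zip_range]
  have hnodup : (((pvSS itr).map (fun s => (s, pvRank itr s))).map Prod.fst).Nodup := by
    simp only [List.map_map]
    simpa [Function.comp_def] using pv_nodup_SS itr
  apply PySem.Dict.getD_of_mem_items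
  · rw [pv_items_ofList _ hnodup]
    exact List.mem_map_of_mem ((pv_mem_SS itr x).mpr hx)
  · rw [pv_keys_ofList]
    exact PySem.Set.nodup_ofList _

theorem pv_enumerate_swap {α : Type} (l : List α) : ∀ (s : Int),
    (PySem.List.enumerate l s).map (fun p => (p.2, p.1))
      = l.zip (PySem.List.pyRange s (s + (l.length : Int)) 1) := by
  induction l with
  | nil => intro s; simp [PySem.List.enumerate_nil]
  | cons a t ih =>
    intro s
    have hb : s + ((a :: t).length : Int) = (s + 1) + (t.length : Int) := by
      simp only [List.length_cons]; push_cast; ring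
    rw [hb, PySem.List.pyRange_one_cons (by omega)]
    simp only [PySem.List.enumerate_cons, List.map_cons, List.zip_cons_cons]
    rw [ih (s + 1)]

-- idxOf is injective on the members of a list
theorem pv_idxOf_inj {α : Type} [BEq α] [LawfulBEq α] (l : List α) (a b : α)
    (ha : a ∈ l) (hb : b ∈ l) (h : List.idxOf a l = List.idxOf b l) : a = b := by
  have ha' : List.idxOf a l < l.length := List.idxOf_lt_length_of_mem ha
  have hb' : List.idxOf b l < l.length := List.idxOf_lt_length_of_mem hb
  have hq : l[List.idxOf a l]? = l[List.idxOf b l]? := by rw [h]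
  rw [List.getElem?_eq_getElem ha', List.getElem?_eq_getElem hb',
    List.getElem_idxOf ha', List.getElem_idxOf hb'] at hq
  exact Option.some_inj.mp hq

-- token_to_symbol: looking up a first-encounter token gives its symbol back
theorem pv_t2s_getD (itr : List String) (x : String) (hx : x ∈ pvS itr) (d0 : String) :
    (PySem.Dict.ofList ((pvSpecDict itr).items.map (fun p => (p.2, p.1)))).getD (pvIdx itr x) d0
      = x := by
  have hitems : (pvSpecDict itr).items.map (fun p => (p.2, p.1))
      = (pvS itr).map (fun s => (pvIdx itr s, s)) := by
    simp [pvSpecDict, List.map_map, Function.comp_def]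
  rw [hitems]
  have hnodup : (((pvS itr).map (fun s => (pvIdx itr s, s))).map Prod.fst).Nodup := by
    simp only [List.map_map]
    refine List.Nodup.map_on ?_ (pv_nodup_S itr)
    intro a ha b hb hab
    simp only [Function.comp_def, pvIdx] at hab
    exact pv_idxOf_inj _ a b ha hb (by exact_mod_cast hab)
  apply PySem.Dict.getD_of_mem_items
  · rw [pv_items_ofList _ hnodup]
    exact List.mem_map_of_mem hx
  · rw [pv_keys_ofList]
    exact PySem.Set.nodup_ofList _

-- token_to_token-style dict: a dict over range K looks up as the generating function
theorem pv_getD_range_map (K : Nat) (g : Int → Int) (v : Int) (h0 : 0 ≤ v) (hK : v < (K : Int)) (d0 : Int) :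
    (PySem.Dict.ofList ((PySem.List.pyRange 0 (K : Int) 1).map (fun k => (k, g k)))).getD v d0
      = g v := by
  have hnodup : (((PySem.List.pyRange 0 (K : Int) 1).map (fun k => (k, g k))).map Prod.fst).Nodup := by
    simp only [List.map_map]
    simpa [Function.comp_def] using PySem.List.nodup_pyRange_one 0 (K : Int)
  apply PySem.Dict.getD_of_mem_items
  · rw [pv_items_ofList _ hnodup]
    exact List.mem_map_of_mem ((PySem.List.mem_pyRange_one).mpr ⟨h0, hK⟩)
  · rw [pv_keys_ofList]
    exact PySem.Set.nodup_ofList _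

-- the in-place relabel loop is a map
theorem pv_inplace_map (f : Int → Int) (l : List Int) :
    (PySem.List.pyRange 0 (l.length : Int) 1).foldl
      (fun tk i => PySem.List.pySetD tk i (f (PySem.List.pyGetD tk i 0))) l = l.map f := by
  suffices h : ∀ k : Nat, k ≤ l.length → (PySem.List.pyRange 0 (k : Int) 1).foldl
      (fun tk i => PySem.List.pySetD tk i (f (PySem.List.pyGetD tk i 0))) l
      = (l.take k).map f ++ l.drop k by
    simpa using h l.length le_rfl
  intro k
  induction k with
  | zero => intro _; simp [PySem.List.pyRange_one_eq_nil]
  | succ k ih =>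
    intro hk
    have hk' : k ≤ l.length := Nat.le_of_succ_le hk
    have hklt : k < l.length := hk
    have hcast : ((k + 1 : Nat) : Int) = (k : Int) + 1 := by push_cast; ring
    rw [hcast, PySem.List.pyRange_one_succ_right (by positivity), List.foldl_append, ih hk']
    simp only [List.foldl_cons, List.foldl_nil]
    have htl : (List.map f (l.take k)).length = k := by
      rw [List.length_map, List.length_take]; omega
    have hdrop : l.drop k = l[k] :: l.drop (k + 1) := List.drop_eq_getElem_cons hklt
    have hget : PySem.List.pyGetD (List.map f (l.take k) ++ l.drop k) ((k : Nat) : Int) 0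
        = l[k] := by
      rw [PySem.List.pyGetD_natCast, hdrop]
      rw [List.getD_eq_getElem?_getD, List.getElem?_append_right (by omega)]
      simp [Nat.min_eq_left hk', List.getElem?_eq_getElem hklt]
    rw [hget, PySem.List.pySetD_natCast]
    rw [List.set_append, if_neg (by omega), htl, hdrop]
    simp only [Nat.sub_self, List.set_cons_zero]
    have htake2 : List.take (k + 1) (List.map f l) = List.take k (List.map f l) ++ [f l[k]] := by
      rw [List.take_add_one, List.getElem?_eq_getElem (show k < (List.map f l).length by simpa using hklt)]
      simp
    simp only [List.map_take]
    rw [htake2]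
    simp

theorem pv_inplace_map_dict (d : PySem.Dict Int Int) (l : List Int) :
    (PySem.List.pyRange 0 (l.length : Int) 1).foldl
      (fun tk i => PySem.List.pySetD tk i (d.getD (PySem.List.pyGetD tk i 0) 0)) l
      = l.map (fun t => d.getD t 0) :=
  pv_inplace_map (fun t => d.getD t 0) l

theorem pv_rank_nonneg (itr : List String) (x : String) : 0 ≤ pvIdx itr x := by
  unfold pvIdx; positivity

theorem pv_rank_lt (itr : List String) (x : String) (hx : x ∈ pvS itr) :
    pvIdx itr x < ((pvS itr).length : Int) := by
  unfold pvIdx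
  exact_mod_cast List.idxOf_lt_length_of_mem hx

-- ===== VERDICT (by name: the statement is the Claim_ definition above) =====
theorem int_tokenize_spec : Claim_equal_int_tokenize := by
  intro itr lex _hdom
  unfold Spec_int_tokenize
  cases lex with
  | false =>
    show int_tokenize itr false = int_tokenize_alt itr false
    simp only [int_tokenize, int_tokenize_alt, Bool.false_eq_true, if_false]
    rw [pv_foldA, pv_foldB]
  | true =>
    show int_tokenize itr true = int_tokenize_alt itr true
    simp only [int_tokenize, int_tokenize_alt, if_true]
    rw [pv_foldA]
    dsimp only
    rw [pv_keys_spec, pv_size_spec,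
      show PySem.Set.ofList itr = pvS itr from rfl,
      show PySem.List.sorted (pvS itr) (fun s => s) false = pvSS itr from rfl]
    -- B's insert loop over the enumerated sorted symbols is the zip dict of A
    have hB : (PySem.List.enumerate (pvSS itr) 0).foldl
        (fun (d : PySem.Dict String Int) p => d.insert p.2 p.1) PySem.Dict.empty
        = PySem.Dict.ofList ((pvSS itr).zip
            (PySem.List.pyRange 0 ((pvS itr).length : Int) 1)) := by
      rw [show ((pvSS itr).zip (PySem.List.pyRange 0 ((pvS itr).length : Int) 1))
          = (PySem.List.enumerate (pvSS itr) 0).map (fun p => (p.2, p.1)) from by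
        rw [pv_enumerate_swap]
        rw [zero_add, pv_length_SS]]
      show _ = ((PySem.List.enumerate (pvSS itr) 0).map (fun p => (p.2, p.1))).foldl
        (fun d q => d.insert q.1 q.2) PySem.Dict.empty
      rw [List.foldl_map]
    rw [hB, pv_inplace_map_dict, List.map_map]
    refine Prod.ext ?_ rfl
    dsimp only
    apply List.map_congr_left
    intro x hxmem
    have hx : x ∈ pvS itr := pv_mem_S itr x hxmem
    simp only [Function.comp_def]
    rw [pv_getD_range_map _ _ _ (pv_rank_nonneg itr x) (pv_rank_lt itr x hx),
      pv_t2s_getD itr x hx, pv_getD_ofList_zip itr x hx]
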